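-- pv_equiv track=rewrite | github.com/yamukadam/EECS_210 | Assignment_5/main.py | is_func
-- ===== SOURCE A (Python) =====
-- def is_func(f):
--     #function to see if relation is a function or not
--     my_dict = {}
--     #create a dict to test, as in dictionaries each key can only be paired to one value, closely resembling a function
--     for elem in f:
--         #iterate through the relation
--         if elem[0] in my_dict:
--             #check if the element is already in mapping
--             if my_dict[elem[0]] != elem[1]:
--                 #if the x value of elem is paired with another value, then the relation is not a function
--                 return False
--         else:
--             my_dict[elem[0]] = elem[1]
--             #map x value to y value in dict for future testing purposes
--     #if func reaches here, then f is a function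
--     return True
-- ===== SOURCE B (Python) =====
-- def is_func(f):
--     # A relation is a function iff collapsing pairs onto their first
--     # coordinate loses no distinct pairs.
--     keys = {e[0] for e in f}
--     pairs = {(e[0], e[1]) for e in f}
--     return len(keys) == len(pairs)
-- ===== Notes on version B (the rewrite author's own statement) =====
-- stated objective: simpler
-- what changed: Replaces the stateful dict loop with early return by two set comprehensions: the relation is a function iff the number of distinct keys equals the number of distinct pairs.
import Mathlib
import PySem

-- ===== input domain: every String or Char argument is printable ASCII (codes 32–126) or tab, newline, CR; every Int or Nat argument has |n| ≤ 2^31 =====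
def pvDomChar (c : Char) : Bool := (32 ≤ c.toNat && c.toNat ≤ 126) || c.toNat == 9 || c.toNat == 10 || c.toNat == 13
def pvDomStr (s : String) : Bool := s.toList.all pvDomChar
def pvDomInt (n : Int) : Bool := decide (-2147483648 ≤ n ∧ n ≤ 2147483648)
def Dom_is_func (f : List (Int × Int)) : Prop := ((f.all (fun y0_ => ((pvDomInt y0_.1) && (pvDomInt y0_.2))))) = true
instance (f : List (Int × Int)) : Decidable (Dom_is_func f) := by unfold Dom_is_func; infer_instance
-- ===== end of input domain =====

-- B replaces A's stateful dict loop (with early return) by comparing the number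
-- of distinct keys with the number of distinct pairs; objective: simpler.


-- ===== PORT A =====
-- the 'for elem in f' loop carrying my_dict, with the early 'return False'
def isFuncLoop (d : PySem.Dict Int Int) : List (Int × Int) → Bool
  | [] => true
  | elem :: rest =>
    match d.get? elem.1 with            -- 'elem[0] in my_dict' + 'my_dict[elem[0]]'
    | some v => if v != elem.2 then false else isFuncLoop d rest
    | none => isFuncLoop (d.insert elem.1 elem.2) rest

def is_func (f : List (Int × Int)) : Bool :=
  isFuncLoop PySem.Dict.empty f

-- ===== PORT B =====
def is_func_alt (f : List (Int × Int)) : Bool :=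
  let keys : PySem.Set Int := PySem.Set.ofList (f.map (fun e => e.1))
  let pairs : PySem.Set (Int × Int) := PySem.Set.ofList (f.map (fun e => (e.1, e.2)))
  PySem.Set.len keys == PySem.Set.len pairs

-- ===== PRECONDITION & SPEC =====
def Spec_is_func (f : List (Int × Int)) (out : Bool) : Prop := out = is_func_alt f
instance (f : List (Int × Int)) (out : Bool) : Decidable (Spec_is_func f out) := by unfold Spec_is_func; infer_instance

-- ===== CLAIM (what is proved, stated in full; the proofs are below) =====
def Claim_equal_is_func : Prop := ∀ (f : List (Int × Int)), Dom_is_func f → Spec_is_func f (is_func f)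

-- ===== LEMMAS AND PROOFS =====

-- 'f is a function': any two pairs with the same key carry the same value
def IsFunRel (f : List (Int × Int)) : Prop :=
  ∀ p ∈ f, ∀ q ∈ f, p.1 = q.1 → p.2 = q.2

-- a PySem.Set built from a list has as many elements as the list's Finset of elements
lemma ofList_length_eq_card {α : Type} [BEq α] [LawfulBEq α] [DecidableEq α] (l : List α) :
    (PySem.Set.ofList l).length = l.toFinset.card := by
  have h : (PySem.Set.ofList l : List α).toFinset = l.toFinset := by
    ext x; simp [PySem.Set.mem_ofList]
  rw [← h, List.toFinset_card_of_nodup (PySem.Set.nodup_ofList l)]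

-- loop invariant: result true iff every pair is either already recorded in d
-- with exactly its value, or its key is fresh in d and consistent throughout f
lemma isFuncLoop_iff (d : PySem.Dict Int Int) (f : List (Int × Int)) :
    isFuncLoop d f = true ↔
      ∀ p ∈ f, d.get? p.1 = some p.2 ∨
        (d.get? p.1 = none ∧ ∀ q ∈ f, q.1 = p.1 → q.2 = p.2) := by
  induction f generalizing d with
  | nil => simp [isFuncLoop]
  | cons e rest ih =>
    obtain ⟨a, b⟩ := e
    cases hd : d.get? a with
    | some v =>
      by_cases hv : v = b
      · subst hv
        rw [show isFuncLoop d ((a, v) :: rest) = isFuncLoop d rest by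
          simp [isFuncLoop, hd], ih]
        constructor
        · intro h p hp
          rcases List.mem_cons.1 hp with rfl | hp'
          · exact Or.inl hd
          · rcases h p hp' with h1 | ⟨h2, h3⟩
            · exact Or.inl h1
            · refine Or.inr ⟨h2, fun q hq hq1 => ?_⟩
              rcases List.mem_cons.1 hq with rfl | hq'
              · exact absurd (hq1 ▸ h2) (by simp [hd])
              · exact h3 q hq' hq1
        · intro h p hp
          rcases h p (List.mem_cons_of_mem _ hp) with h1 | ⟨h2, h3⟩
          · exact Or.inl h1
          · exact Or.inr ⟨h2, fun q hq hq1 => h3 q (List.mem_cons_of_mem _ hq) hq1⟩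
      · have : isFuncLoop d ((a, b) :: rest) = false := by
          simp [isFuncLoop, hd, bne, hv]
        rw [this]
        simp only [Bool.false_eq_true, false_iff]
        intro h
        rcases h (a, b) List.mem_cons_self with h1 | ⟨h2, _⟩
        · rw [hd] at h1; exact hv (Option.some.inj h1)
        · rw [hd] at h2; simp at h2
    | none =>
      simp only [isFuncLoop, hd, ih]
      constructor
      · intro h p hp
        rcases List.mem_cons.1 hp with rfl | hp'
        · refine Or.inr ⟨hd, fun q hq hq1 => ?_⟩
          rcases List.mem_cons.1 hq with rfl | hq'
          · rfl
          · rcases h q hq' with h1 | ⟨h2, _⟩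
            · rw [PySem.Dict.get?_insert, hq1, if_pos rfl] at h1
              exact (Option.some.inj h1).symm
            · rw [PySem.Dict.get?_insert, hq1, if_pos rfl] at h2
              simp at h2
        · have hkey : ∀ q ∈ rest, q.1 = a → q.2 = b := by
            intro q hq hq1
            rcases h q hq with h1 | ⟨h2, _⟩
            · rw [PySem.Dict.get?_insert, hq1, if_pos rfl] at h1
              exact (Option.some.inj h1).symm
            · rw [PySem.Dict.get?_insert, hq1, if_pos rfl] at h2
              simp at h2
          by_cases hpa : p.1 = a
          · have hpb : p.2 = b := hkey p hp' hpa
            refine Or.inr ⟨hpa ▸ hd, fun q hq hq1 => ?_⟩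
            rcases List.mem_cons.1 hq with rfl | hq'
            · simp [hpb]
            · rw [hkey q hq' (hq1.trans hpa), hpb]
          · rcases h p hp' with h1 | ⟨h2, h3⟩
            · rw [PySem.Dict.get?_insert, if_neg hpa] at h1
              exact Or.inl h1
            · rw [PySem.Dict.get?_insert, if_neg hpa] at h2
              refine Or.inr ⟨h2, fun q hq hq1 => ?_⟩
              rcases List.mem_cons.1 hq with rfl | hq'
              · exact absurd hq1.symm hpa
              · exact h3 q hq' hq1
      · intro h p hp
        have hhead := h (a, b) List.mem_cons_self
        have hkey : ∀ q ∈ (a, b) :: rest, q.1 = a → q.2 = b := by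
          rcases hhead with h1 | ⟨_, h3⟩
          · rw [hd] at h1; simp at h1
          · exact h3
        by_cases hpa : p.1 = a
        · rcases h p (List.mem_cons_of_mem _ hp) with h1 | ⟨h2, h3⟩
          · exact Or.inl (by rw [PySem.Dict.get?_insert, if_pos hpa,
              hkey p (List.mem_cons_of_mem _ hp) hpa])
          · exact Or.inl (by rw [PySem.Dict.get?_insert, if_pos hpa,
              hkey p (List.mem_cons_of_mem _ hp) hpa])
        · rcases h p (List.mem_cons_of_mem _ hp) with h1 | ⟨h2, h3⟩
          · exact Or.inl (by rw [PySem.Dict.get?_insert, if_neg hpa]; exact h1)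
          · refine Or.inr ⟨by rwa [PySem.Dict.get?_insert, if_neg hpa], fun q hq hq1 => ?_⟩
            exact h3 q (List.mem_cons_of_mem _ hq) hq1

lemma is_func_iff (f : List (Int × Int)) : is_func f = true ↔ IsFunRel f := by
  unfold is_func
  rw [isFuncLoop_iff]
  simp only [PySem.Dict.get?_empty, reduceCtorEq, false_or, true_and]
  exact ⟨fun h p hp q hq h1 => h q hq p hp h1,
         fun h p hp q hq h1 => h q hq p hp h1⟩

lemma is_func_alt_iff (f : List (Int × Int)) : is_func_alt f = true ↔ IsFunRel f := by
  unfold is_func_alt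
  simp only [PySem.Set.len, beq_iff_eq, Nat.cast_inj]
  rw [ofList_length_eq_card, ofList_length_eq_card]
  have hm : f.map (fun e => (e.1, e.2)) = f := by simp
  rw [hm]
  have hmap : (f.map (fun e : Int × Int => e.1)).toFinset = f.toFinset.image Prod.fst := by
    ext x; simp
  rw [hmap, Finset.card_image_iff]
  constructor
  · intro hinj p hp q hq h1
    have := hinj (by simpa using hp) (by simpa using hq) h1
    rw [this]
  · intro hP p hp q hq h1
    exact Prod.ext h1 (hP p (by simpa using hp) q (by simpa using hq) h1)

-- ===== VERDICT (by name: the statement is the Claim_ definition above) =====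
theorem is_func_spec : Claim_equal_is_func := by
  intro f _
  exact Bool.eq_iff_iff.mpr ((is_func_iff f).trans (is_func_alt_iff f).symm)
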